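-- pv_equiv track=rewrite | github.com/mraiser/videoprops | 20230821_image_processing/find.py | bounds
-- ===== SOURCE A (Python) =====
-- def bounds(points, w, h):
--   minx = w + 1
--   miny = h + 1
--   maxx = -1
--   maxy = -1
--
--   for point in points:
--     if point[1] < minx:
--       minx = point[1]
--     if point[1] > maxx:
--       maxx = point[1]
--     if point[2] < miny:
--       miny = point[2]
--     if point[2] > maxy:
--       maxy = point[2]
--
--   if maxx < 0:
--     return None
--   if maxy < 0:
--     return None
--   if minx > w:
--     return None
--   if miny > h:
--     return None
--
--
--   if minx < 0:
--     minx = 0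
--   if miny < 0:
--     miny = 0
--   if maxx > w:
--     maxx = w
--   if maxy > h:
--     maxy = h
--
--   return [minx, miny, maxx, maxy]
-- ===== SOURCE B (Python) =====
-- def bounds(points, w, h):
--   if not points:
--     return None
--   xs = sorted(p[1] for p in points)
--   ys = sorted(p[2] for p in points)
--   if xs[-1] < 0 or ys[-1] < 0 or xs[0] > w or ys[0] > h:
--     return None
--   return [max(0, xs[0]), max(0, ys[0]), min(w, xs[-1]), min(h, ys[-1])]
-- ===== Notes on version B (the rewrite author's own statement) =====
-- stated objective: alternative
-- what changed: Instead of A's single pass threading four running extrema, B sorts the projected x and y coordinate lists and reads the bounding box off the sorted endpoints (first = min, last = max), then rejects or clamps in closed form.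
import Mathlib
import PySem

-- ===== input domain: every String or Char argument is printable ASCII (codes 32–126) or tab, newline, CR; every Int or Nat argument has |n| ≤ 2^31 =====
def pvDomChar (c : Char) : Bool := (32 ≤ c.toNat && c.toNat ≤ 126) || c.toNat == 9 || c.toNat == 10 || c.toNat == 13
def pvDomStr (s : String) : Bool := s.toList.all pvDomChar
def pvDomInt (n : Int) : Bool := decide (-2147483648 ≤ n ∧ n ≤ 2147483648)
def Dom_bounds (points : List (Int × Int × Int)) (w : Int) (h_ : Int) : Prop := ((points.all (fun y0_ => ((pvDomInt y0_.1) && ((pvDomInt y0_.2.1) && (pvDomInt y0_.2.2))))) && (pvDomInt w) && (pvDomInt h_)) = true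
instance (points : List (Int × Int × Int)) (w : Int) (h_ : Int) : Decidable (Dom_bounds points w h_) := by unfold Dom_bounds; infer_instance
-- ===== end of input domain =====

-- B replaces A's single four-accumulator scan by sorting the projected x and y coordinate
-- lists and reading the box off the sorted endpoints, then clamping in closed form;
-- objective: alternative (same result by a sort-based algorithm, not a running-extrema pass).

-- ===== PORT A =====
def bounds (points : List (Int × Int × Int)) (w : Int) (h_ : Int) : Option (List Int) :=
  let st := points.foldl (fun (st : Int × Int × Int × Int) point =>
    let minx := if point.2.1 < st.1 then point.2.1 else st.1
    let maxx := if point.2.1 > st.2.2.1 then point.2.1 else st.2.2.1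
    let miny := if point.2.2 < st.2.1 then point.2.2 else st.2.1
    let maxy := if point.2.2 > st.2.2.2 then point.2.2 else st.2.2.2
    (minx, miny, maxx, maxy)) (w + 1, h_ + 1, -1, -1)
  if st.2.2.1 < 0 then none
  else if st.2.2.2 < 0 then none
  else if st.1 > w then none
  else if st.2.1 > h_ then none
  else
    let minx := if st.1 < 0 then 0 else st.1
    let miny := if st.2.1 < 0 then 0 else st.2.1
    let maxx := if st.2.2.1 > w then w else st.2.2.1
    let maxy := if st.2.2.2 > h_ then h_ else st.2.2.2
    some [minx, miny, maxx, maxy]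

-- ===== PORT B =====
def bounds_alt (points : List (Int × Int × Int)) (w : Int) (h_ : Int) : Option (List Int) :=
  if points.isEmpty then none
  else
    let xs := PySem.List.sorted (points.map (fun p => p.2.1)) (fun y => y) false
    let ys := PySem.List.sorted (points.map (fun p => p.2.2)) (fun y => y) false
    -- xs, ys are nonempty here, so Python's xs[0]/xs[-1] never raise; the .getD 0 default is unreachable
    let mnx := (PySem.List.pyGet? xs 0).getD 0
    let mxx := (PySem.List.pyGet? xs (-1)).getD 0
    let mny := (PySem.List.pyGet? ys 0).getD 0
    let mxy := (PySem.List.pyGet? ys (-1)).getD 0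
    if mxx < 0 ∨ mxy < 0 ∨ mnx > w ∨ mny > h_ then none
    else some [max 0 mnx, max 0 mny, min w mxx, min h_ mxy]

-- ===== PRECONDITION & SPEC =====
def Spec_bounds (points : List (Int × Int × Int)) (w : Int) (h_ : Int) (out : Option (List Int)) : Prop := out = bounds_alt points w h_
instance (points : List (Int × Int × Int)) (w : Int) (h_ : Int) (out : Option (List Int)) : Decidable (Spec_bounds points w h_ out) := by unfold Spec_bounds; infer_instance

-- ===== CLAIM (what is proved, stated in full; the proofs are below) =====
def Claim_equal_bounds : Prop := ∀ (points : List (Int × Int × Int)) (w : Int) (h_ : Int), Dom_bounds points w h_ → Spec_bounds points w h_ (bounds points w h_)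

-- ===== LEMMAS AND PROOFS =====

-- A's combined loop computes the four independent extrema of the projected coordinates.
lemma boundsA_fold (t : List (Int × Int × Int)) (a b c d : Int) :
    t.foldl (fun (st : Int × Int × Int × Int) point =>
      let minx := if point.2.1 < st.1 then point.2.1 else st.1
      let maxx := if point.2.1 > st.2.2.1 then point.2.1 else st.2.2.1
      let miny := if point.2.2 < st.2.1 then point.2.2 else st.2.1
      let maxy := if point.2.2 > st.2.2.2 then point.2.2 else st.2.2.2
      (minx, miny, maxx, maxy)) (a, b, c, d)
    = ((t.map (fun p => p.2.1)).foldl min a, (t.map (fun p => p.2.2)).foldl min b,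
       (t.map (fun p => p.2.1)).foldl max c, (t.map (fun p => p.2.2)).foldl max d) := by
  induction t generalizing a b c d with
  | nil => rfl
  | cons p t ih =>
      simp only [List.foldl_cons, List.map_cons]
      rw [ih]
      congr 1 <;> [skip; congr 1 <;> [skip; congr 1]] <;> congr 1 <;> omega

lemma pyGet_zero_of_ne_nil (l : List Int) (h : l ≠ []) : PySem.List.pyGet? l 0 = l.head? := by
  have hn : 0 < l.length := List.length_pos_iff.mpr h
  simp only [PySem.List.pyGet?, PySem.List.pyIdx?]
  rw [if_pos (by omega), if_pos (by omega)]
  simp [List.head?_eq_getElem?]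

lemma pyGet_neg_one_of_ne_nil (l : List Int) (h : l ≠ []) : PySem.List.pyGet? l (-1) = l.getLast? := by
  have hn : 0 < l.length := List.length_pos_iff.mpr h
  simp only [PySem.List.pyGet?, PySem.List.pyIdx?]
  rw [if_neg (by omega), if_pos (by omega)]
  simp [List.getLast?_eq_getElem?]

lemma foldl_min_of_le (t : List Int) (b : Int) (h : ∀ y ∈ t, b ≤ y) :
    ∀ a, t.foldl min (min a b) = min a b := by
  induction t with
  | nil => intro a; rfl
  | cons x t ih =>
      intro a
      have hbx : b ≤ x := h x (by simp)
      have : min (min a b) x = min (min a b) b := by omega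
      simpa [this] using ih (fun y hy => h y (by simp [hy])) (min a b)

lemma foldl_max_of_ge (t : List Int) (b : Int) (h : ∀ y ∈ t, y ≤ b) :
    ∀ a, t.foldl max (max a b) = max a b := by
  induction t with
  | nil => intro a; rfl
  | cons x t ih =>
      intro a
      have hbx : x ≤ b := h x (by simp)
      have : max (max a b) x = max (max a b) b := by omega
      simpa [this] using ih (fun y hy => h y (by simp [hy])) (max a b)

-- the head of the ascending sort is the running minimum of the list
lemma foldl_min_sorted (l : List Int) (m : Int) (t : List Int)
    (hs : PySem.List.sorted l (fun y => y) false = m :: t) (a : Int) :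
    l.foldl min a = min a m := by
  have hperm : (m :: t).Perm l := hs ▸ PySem.List.sorted_perm l (fun y => y) false
  have hpw := PySem.List.sorted_pairwise l (fun y => y)
  rw [hs] at hpw
  have hle : ∀ y ∈ t, m ≤ y := (List.pairwise_cons.mp hpw).1
  rw [← hperm.foldl_eq a, List.foldl_cons]
  exact foldl_min_of_le t m hle a

-- the last element of the ascending sort is the running maximum of the list
lemma foldl_max_sorted (l : List Int) (s : List Int) (M : Int) (t : List Int)
    (hs : PySem.List.sorted l (fun y => y) false = s) (hr : s.reverse = M :: t) (a : Int) :
    l.foldl max a = max a M := by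
  have hperm : (M :: t).Perm l := by
    rw [← hr]
    exact (s.reverse_perm).trans (hs ▸ PySem.List.sorted_perm l (fun y => y) false)
  have hpw := PySem.List.sorted_pairwise l (fun y => y)
  rw [hs] at hpw
  have hpwr : s.reverse.Pairwise (fun a b => b ≤ a) := List.pairwise_reverse.mpr hpw
  rw [hr] at hpwr
  have hge : ∀ y ∈ t, y ≤ M := (List.pairwise_cons.mp hpwr).1
  rw [← hperm.foldl_eq a, List.foldl_cons]
  exact foldl_max_of_ge t M hge a

-- A's guard-then-conditional-clamp equals B's guard-then-closed-form-clamp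
lemma bounds_branches (x y X Y w h_ : Int) :
    (if max (-1) X < 0 then (none : Option (List Int))
     else if max (-1) Y < 0 then none
     else if min (w + 1) x > w then none
     else if min (h_ + 1) y > h_ then none
     else some [if min (w + 1) x < 0 then 0 else min (w + 1) x,
                if min (h_ + 1) y < 0 then 0 else min (h_ + 1) y,
                if max (-1) X > w then w else max (-1) X,
                if max (-1) Y > h_ then h_ else max (-1) Y])
    = (if X < 0 ∨ Y < 0 ∨ x > w ∨ y > h_ then none
       else some [max 0 x, max 0 y, min w X, min h_ Y]) := by
  split_ifs <;>
    first
      | rfl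
      | omega
      | (simp only [Option.some.injEq, List.cons.injEq, and_true]; omega)

-- ===== VERDICT (by name: the statement is the Claim_ definition above) =====
theorem bounds_spec : Claim_equal_bounds := by
  intro points w h_ _
  unfold Spec_bounds bounds bounds_alt
  cases hp : points with
  | nil => simp
  | cons p tl =>
      simp only [List.isEmpty_cons, Bool.false_eq_true, if_false, boundsA_fold]
      have hxs : points.map (fun p => p.2.1) ≠ [] := by simp [hp]
      have hys : points.map (fun p => p.2.2) ≠ [] := by simp [hp]
      rw [← hp]
      obtain ⟨m, t, hsx⟩ : ∃ m t, PySem.List.sorted (points.map (fun p => p.2.1)) (fun y => y) false = m :: t := by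
        cases hc : PySem.List.sorted (points.map (fun p => p.2.1)) (fun y => y) false with
        | nil => exact absurd ((PySem.List.sorted_eq_nil_iff _ _ _).mp hc) hxs
        | cons a b => exact ⟨a, b, rfl⟩
      obtain ⟨my, ty, hsy⟩ : ∃ m t, PySem.List.sorted (points.map (fun p => p.2.2)) (fun y => y) false = m :: t := by
        cases hc : PySem.List.sorted (points.map (fun p => p.2.2)) (fun y => y) false with
        | nil => exact absurd ((PySem.List.sorted_eq_nil_iff _ _ _).mp hc) hys
        | cons a b => exact ⟨a, b, rfl⟩
      obtain ⟨M, t', hrx⟩ : ∃ M t', (m :: t).reverse = M :: t' := by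
        cases hc : (m :: t).reverse with
        | nil => exact absurd hc (by simp)
        | cons a b => exact ⟨a, b, rfl⟩
      obtain ⟨My, ty', hry⟩ : ∃ M t', (my :: ty).reverse = M :: t' := by
        cases hc : (my :: ty).reverse with
        | nil => exact absurd hc (by simp)
        | cons a b => exact ⟨a, b, rfl⟩
      rw [hsx, hsy,
        pyGet_zero_of_ne_nil _ (by simp), pyGet_zero_of_ne_nil _ (by simp),
        pyGet_neg_one_of_ne_nil _ (by simp), pyGet_neg_one_of_ne_nil _ (by simp),
        ← List.head?_reverse, ← List.head?_reverse, hrx, hry]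
      simp only [List.head?_cons, Option.getD_some]
      rw [foldl_min_sorted _ _ _ hsx, foldl_min_sorted _ _ _ hsy,
        foldl_max_sorted _ _ _ _ hsx hrx, foldl_max_sorted _ _ _ _ hsy hry]
      exact bounds_branches m my M My w h_
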